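-- pv_equiv track=rewrite | github.com/sdamache/konveyor | konveyor/core/chat/formatters.py | parse_conversation_history
-- ===== SOURCE A (Python) =====
-- from typing import Any, Dict, List, Optional  # noqa: F401
--
-- def parse_conversation_history(history: str) -> List[Dict[str, Any]]:
--     """
--     Parse a conversation history string into a list of message dictionaries.
--
--     Args:
--         history: Conversation history string
--
--     Returns:
--         List of message dictionaries with 'role' and 'content' keys
--     """
--     if not history:
--         return []
--
--     messages = []
--     lines = history.split("\n")
--     current_role = None
--     current_content = []
--
--     for line in lines:
--         if line.startswith("User: "):
--             # Save the previous message if there is one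
--             if current_role:
--                 messages.append(
--                     {"role": current_role, "content": "\n".join(current_content)}
--                 )
--
--             # Start a new user message
--             current_role = "user"
--             current_content = [line[6:]]  # Remove "User: " prefix
--         elif line.startswith("Assistant: "):
--             # Save the previous message if there is one
--             if current_role:
--                 messages.append(
--                     {"role": current_role, "content": "\n".join(current_content)}
--                 )
--
--             # Start a new assistant message
--             current_role = "assistant"
--             current_content = [line[11:]]  # Remove "Assistant: " prefix
--         elif line.startswith("System: "):
--             # Save the previous message if there is one
--             if current_role:
--                 messages.append(
--                     {"role": current_role, "content": "\n".join(current_content)}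
--                 )
--
--             # Start a new system message
--             current_role = "system"
--             current_content = [line[8:]]  # Remove "System: " prefix
--         else:
--             # Continue the current message
--             current_content.append(line)
--
--     # Add the last message
--     if current_role:
--         messages.append({"role": current_role, "content": "\n".join(current_content)})
--
--     return messages
-- ===== SOURCE B (Python) =====
-- from typing import Any, Dict, List, Optional  # noqa: F401
--
-- _PREFIXES = (("user", "User: "), ("assistant", "Assistant: "), ("system", "System: "))
--
--
-- def _marker(line):
--     """Return (role, first-line content) if line starts a message, else None."""
--     for role, prefix in _PREFIXES:
--         if line.startswith(prefix):
--             return role, line[len(prefix):]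
--     return None
--
--
-- def parse_conversation_history(history: str) -> List[Dict[str, Any]]:
--     if not history:
--         return []
--     lines = history.split("\n")
--     n = len(lines)
--     messages = []
--     i = 0
--     while i < n:
--         m = _marker(lines[i])
--         if m is None:
--             i += 1  # line before the first marker: dropped
--             continue
--         role, first = m
--         body = [first]
--         j = i + 1
--         while j < n and _marker(lines[j]) is None:
--             body.append(lines[j])
--             j += 1
--         messages.append({"role": role, "content": "\n".join(body)})
--         i = j
--     return messages
-- ===== Notes on version B (the rewrite author's own statement) =====
-- stated objective: alternative
-- what changed: Replaces A's single fold carrying mutable current-role/current-content state (with a save-pending-message step duplicated in three branches and a final flush) by a group-at-a-time scan: a marker classifier plus an outer loop that, at each marker line, consumes that message's continuation lines in an inner loop and emits the message immediately, with no pending state or final flush.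
import Mathlib
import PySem

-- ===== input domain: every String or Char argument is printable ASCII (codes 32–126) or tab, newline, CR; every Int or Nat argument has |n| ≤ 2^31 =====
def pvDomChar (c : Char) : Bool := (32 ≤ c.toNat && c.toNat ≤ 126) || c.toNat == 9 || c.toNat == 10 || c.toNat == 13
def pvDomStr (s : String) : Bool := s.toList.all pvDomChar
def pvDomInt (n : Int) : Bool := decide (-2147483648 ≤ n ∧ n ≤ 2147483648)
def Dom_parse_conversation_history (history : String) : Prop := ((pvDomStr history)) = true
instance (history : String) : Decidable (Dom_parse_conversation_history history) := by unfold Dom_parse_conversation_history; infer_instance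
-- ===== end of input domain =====

-- B replaces A's fold carrying pending current-role/current-content state (and a final flush)
-- by a group-at-a-time scan that emits each message as soon as its continuation lines end;
-- objective: alternative decomposition, same cost.

-- ===== PORT A =====
-- A's loop state: (messages, current_role, current_content)
def pvStepA (st : List (List (String × String)) × Option String × List String)
    (line : String) : List (List (String × String)) × Option String × List String :=
  if PySem.Str.startswith line "User: " then
    ((match st.2.1 with
      | some r => st.1 ++ [[("role", r), ("content", PySem.Str.join "\n" st.2.2)]]
      | none => st.1),
     some "user", [PySem.Str.slice line (some 6) none])
  else if PySem.Str.startswith line "Assistant: " then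
    ((match st.2.1 with
      | some r => st.1 ++ [[("role", r), ("content", PySem.Str.join "\n" st.2.2)]]
      | none => st.1),
     some "assistant", [PySem.Str.slice line (some 11) none])
  else if PySem.Str.startswith line "System: " then
    ((match st.2.1 with
      | some r => st.1 ++ [[("role", r), ("content", PySem.Str.join "\n" st.2.2)]]
      | none => st.1),
     some "system", [PySem.Str.slice line (some 8) none])
  else
    (st.1, st.2.1, st.2.2 ++ [line])

def parse_conversation_history (history : String) : List (List (String × String)) :=
  if history = "" then []
  else
    let lines := (PySem.Str.split? history "\n").getD []   -- sep ≠ "": split? is always `some`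
    let res := lines.foldl pvStepA ([], none, [])
    match res.2.1 with
    | some r => res.1 ++ [[("role", r), ("content", PySem.Str.join "\n" res.2.2)]]
    | none => res.1

-- ===== PORT B =====
-- B's marker classifier: (role, prefix-stripped first-line content) if the line starts a message
def pvMarker (line : String) : Option (String × String) :=
  if PySem.Str.startswith line "User: " then some ("user", PySem.Str.slice line (some 6) none)
  else if PySem.Str.startswith line "Assistant: " then some ("assistant", PySem.Str.slice line (some 11) none)
  else if PySem.Str.startswith line "System: " then some ("system", PySem.Str.slice line (some 8) none)
  else none

-- B's inner loop: consume continuation (non-marker) lines, return (body, remaining lines)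
def pvCollect : List String → List String × List String
  | [] => ([], [])
  | l :: rest =>
    match pvMarker l with
    | some _ => ([], l :: rest)
    | none => let p := pvCollect rest; (l :: p.1, p.2)

theorem pvCollect_snd_length_le : ∀ (ls : List String), (pvCollect ls).2.length ≤ ls.length := by
  intro ls
  induction ls with
  | nil => simp [pvCollect]
  | cons l rest ih =>
    simp only [pvCollect]
    cases pvMarker l
    · simp; omega
    · simp

-- B's outer loop: at a marker line emit the whole message, else skip (pre-first-marker line)
def pvGroups : List String → List (List (String × String))
  | [] => []
  | l :: rest =>
    match pvMarker l with
    | none => pvGroups rest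
    | some m =>
      let p := pvCollect rest
      [("role", m.1), ("content", PySem.Str.join "\n" (m.2 :: p.1))] :: pvGroups p.2
termination_by ls => ls.length
decreasing_by
  · simp
  · have := pvCollect_snd_length_le rest; simp; omega

def parse_conversation_history_alt (history : String) : List (List (String × String)) :=
  if history = "" then []
  else pvGroups ((PySem.Str.split? history "\n").getD [])

-- ===== PRECONDITION & SPEC =====
def Spec_parse_conversation_history (history : String) (out : List (List (String × String))) : Prop := out = parse_conversation_history_alt history
instance (history : String) (out : List (List (String × String))) : Decidable (Spec_parse_conversation_history history out) := by unfold Spec_parse_conversation_history; infer_instance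

-- ===== CLAIM (what is proved, stated in full; the proofs are below) =====
def Claim_equal_parse_conversation_history : Prop := ∀ (history : String), Dom_parse_conversation_history history → Spec_parse_conversation_history history (parse_conversation_history history)

-- ===== LEMMAS AND PROOFS =====
-- A's trailing flush: append the pending message, if any
def pvFinalize (st : List (List (String × String)) × Option String × List String) :
    List (List (String × String)) :=
  match st.2.1 with
  | some r => st.1 ++ [[("role", r), ("content", PySem.Str.join "\n" st.2.2)]]
  | none => st.1

-- A's fold from an "active" state (current role r, content cc) yields the pending message
-- (completed by the lines pvCollect takes) followed by B's groups of the remainder.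
theorem pv_fold_active : ∀ (lines : List String) (msgs : List (List (String × String)))
    (r : String) (cc : List String),
    pvFinalize (lines.foldl pvStepA (msgs, some r, cc)) =
      msgs ++ [("role", r), ("content", PySem.Str.join "\n" (cc ++ (pvCollect lines).1))]
        :: pvGroups (pvCollect lines).2 := by
  intro lines
  induction lines with
  | nil => intro msgs r cc; simp [pvCollect, pvGroups, pvFinalize]
  | cons l rest ih =>
    intro msgs r cc
    simp only [List.foldl_cons]
    by_cases hu : PySem.Str.startswith l "User: " <;> simp at hu
    case pos =>
      rw [show pvStepA (msgs, some r, cc) l =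
        (msgs ++ [[("role", r), ("content", PySem.Str.join "\n" cc)]], some "user",
          [PySem.Str.slice l (some 6) none]) from by simp [pvStepA, hu]]
      rw [ih]
      simp [pvCollect, pvGroups, pvMarker, hu]
    case neg =>
    by_cases ha : PySem.Str.startswith l "Assistant: " <;> simp at ha
    case pos =>
      rw [show pvStepA (msgs, some r, cc) l =
        (msgs ++ [[("role", r), ("content", PySem.Str.join "\n" cc)]], some "assistant",
          [PySem.Str.slice l (some 11) none]) from by simp [pvStepA, hu, ha]]
      rw [ih]
      simp [pvCollect, pvGroups, pvMarker, hu, ha]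
    case neg =>
    by_cases hs : PySem.Str.startswith l "System: " <;> simp at hs
    case pos =>
      rw [show pvStepA (msgs, some r, cc) l =
        (msgs ++ [[("role", r), ("content", PySem.Str.join "\n" cc)]], some "system",
          [PySem.Str.slice l (some 8) none]) from by simp [pvStepA, hu, ha, hs]]
      rw [ih]
      simp [pvCollect, pvGroups, pvMarker, hu, ha, hs]
    case neg =>
      rw [show pvStepA (msgs, some r, cc) l = (msgs, some r, cc ++ [l]) from by
        simp [pvStepA, hu, ha, hs]]
      rw [ih]
      simp [pvCollect, pvMarker, hu, ha, hs]

-- in the "no current message" state the accumulated content is never flushed: it is irrelevant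
theorem pv_none_content_irrelevant : ∀ (lines : List String)
    (msgs : List (List (String × String))) (cc cc' : List String),
    pvFinalize (lines.foldl pvStepA (msgs, none, cc)) =
      pvFinalize (lines.foldl pvStepA (msgs, none, cc')) := by
  intro lines
  induction lines with
  | nil => intro msgs cc cc'; simp [pvFinalize]
  | cons l rest ih =>
    intro msgs cc cc'
    simp only [List.foldl_cons]
    by_cases hu : PySem.Str.startswith l "User: " <;> simp at hu
    case pos => simp [pvStepA, hu]
    case neg =>
    by_cases ha : PySem.Str.startswith l "Assistant: " <;> simp at ha
    case pos => simp [pvStepA, hu, ha]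
    case neg =>
    by_cases hs : PySem.Str.startswith l "System: " <;> simp at hs
    case pos => simp [pvStepA, hu, ha, hs]
    case neg =>
      rw [show pvStepA (msgs, none, cc) l = (msgs, none, cc ++ [l]) from by
        simp [pvStepA, hu, ha, hs]]
      rw [show pvStepA (msgs, none, cc') l = (msgs, none, cc' ++ [l]) from by
        simp [pvStepA, hu, ha, hs]]
      exact ih msgs (cc ++ [l]) (cc' ++ [l])

-- A's fold from the initial "no current message" state computes exactly B's groups.
theorem pv_fold_none : ∀ (lines : List String),
    pvFinalize (lines.foldl pvStepA ([], none, [])) = pvGroups lines := by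
  intro lines
  induction lines with
  | nil => simp [pvFinalize, pvGroups]
  | cons l rest ih =>
    simp only [List.foldl_cons]
    by_cases hu : PySem.Str.startswith l "User: " <;> simp at hu
    case pos =>
      rw [show pvStepA ([], none, []) l =
        ([], some "user", [PySem.Str.slice l (some 6) none]) from by simp [pvStepA, hu]]
      rw [pv_fold_active]
      simp [pvGroups, pvMarker, hu]
    case neg =>
    by_cases ha : PySem.Str.startswith l "Assistant: " <;> simp at ha
    case pos =>
      rw [show pvStepA ([], none, []) l =
        ([], some "assistant", [PySem.Str.slice l (some 11) none]) from by simp [pvStepA, hu, ha]]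
      rw [pv_fold_active]
      simp [pvGroups, pvMarker, hu, ha]
    case neg =>
    by_cases hs : PySem.Str.startswith l "System: " <;> simp at hs
    case pos =>
      rw [show pvStepA ([], none, []) l =
        ([], some "system", [PySem.Str.slice l (some 8) none]) from by simp [pvStepA, hu, ha, hs]]
      rw [pv_fold_active]
      simp [pvGroups, pvMarker, hu, ha, hs]
    case neg =>
      rw [show pvStepA ([], none, []) l = ([], none, [] ++ [l]) from by
        simp [pvStepA, hu, ha, hs]]
      -- a non-marker line before the first marker: A buffers it into content that is
      -- never flushed; B skips it
      rw [pv_none_content_irrelevant rest [] ([] ++ [l]) []]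
      rw [ih]
      conv_rhs => rw [pvGroups]
      simp [pvMarker, hu, ha, hs]

-- ===== VERDICT (by name: the statement is the Claim_ definition above) =====
theorem parse_conversation_history_spec : Claim_equal_parse_conversation_history := by
  intro history _
  unfold Spec_parse_conversation_history parse_conversation_history parse_conversation_history_alt
  by_cases h : history = ""
  · simp [h]
  · simp only [h, if_false]
    exact pv_fold_none _
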